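-- pv_equiv track=rewrite | github.com/miliar/Code_Jam_Webscraper | solutions_python/solutions_year16_round2_nr1/1667.py | isWordInString
-- ===== SOURCE A (Python) =====
-- def isWordInString (word, iunorderedString):
--     unorderedString = iunorderedString.copy()
--     for character in word:
--         if (character in unorderedString):
--             unorderedString[character] -= 1
--             if unorderedString[character] == 0:
--                 del unorderedString[character]
--         else:
--             return None
--     return unorderedString
-- ===== SOURCE B (Python) =====
-- def isWordInString(word, iunorderedString):
--     # Count the word once, then subtract each distinct character's need in one batch.
--     need = {}
--     for c in word:
--         need[c] = need.get(c, 0) + 1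
--     result = iunorderedString.copy()
--     for c, n in need.items():
--         have = result.get(c)
--         if have is None or have < n:
--             return None
--         if have == n:
--             del result[c]
--         else:
--             result[c] = have - n
--     return result
-- ===== Notes on version B (the rewrite author's own statement) =====
-- stated objective: alternative
-- what changed: A streams over every occurrence of every character, decrementing the dict entry one step at a time; B counts the word into a tally dict first and then makes one pass over the tally's distinct (char, need) items, failing if the available count is missing or below need and otherwise subtracting the whole need at once (deleting keys consumed exactly to zero).
-- intended difference: On inputs where every character of the word is present in the dict with a count that is either at least its needed multiplicity or nonpositive, and at least one needed character has a nonpositive count, A returns a dict with that count driven further negative (an artefact of its delete-only-on-exactly-zero streaming), while B returns None because the multiset cannot supply the word - the intended reading of a char-count multiset. — e.g. on isWordInString("a", [("a", 0)]): A returns some [("a", -1)], B returns none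
import Mathlib
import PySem

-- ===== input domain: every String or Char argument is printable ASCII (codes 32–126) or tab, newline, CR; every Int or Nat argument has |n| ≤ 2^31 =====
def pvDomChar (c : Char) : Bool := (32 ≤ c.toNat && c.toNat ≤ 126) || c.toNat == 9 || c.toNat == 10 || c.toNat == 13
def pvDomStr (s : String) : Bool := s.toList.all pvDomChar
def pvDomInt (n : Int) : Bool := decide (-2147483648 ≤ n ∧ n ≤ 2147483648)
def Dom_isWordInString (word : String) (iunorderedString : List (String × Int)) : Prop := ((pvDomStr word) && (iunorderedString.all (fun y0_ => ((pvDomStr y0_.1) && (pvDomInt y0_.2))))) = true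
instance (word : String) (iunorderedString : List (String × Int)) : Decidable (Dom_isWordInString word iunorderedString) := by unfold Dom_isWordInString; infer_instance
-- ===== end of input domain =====

-- B replaces A's per-occurrence streaming decrement loop with a count-the-word-first,
-- one-batch-subtraction-per-distinct-character decomposition (objective: alternative decomposition).

-- ===== PORT A =====
-- `for character in word` iterates the characters of `word` as one-character strings.
def pvChars (word : String) : List String := word.toList.map (fun c => String.ofList [c])

-- One iteration of A's loop body: `character in d` / `d[ch] -= 1` / delete on zero;
-- `none` as the accumulator models A's early `return None`.
def pvStepA (acc : Option (PySem.Dict String Int)) (ch : String) : Option (PySem.Dict String Int) :=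
  match acc with
  | none => none
  | some d =>
    match d.get? ch with
    | none => none
    | some v =>
      let d1 := d.insert ch (v - 1)
      if v - 1 = 0 then some (d1.erase ch) else some d1

def isWordInString (word : String) (iunorderedString : List (String × Int)) : Option (List (String × Int)) :=
  ((pvChars word).foldl pvStepA
      (some (PySem.Dict.mk iunorderedString))).map PySem.Dict.items

-- ===== PORT B =====
-- B's second loop: recursion over the tally's (char, need) items, with the running
-- `result` dict as the other argument; `have is None or have < n` fails, `have == n`
-- deletes the key, otherwise the key is overwritten with `have - n`.
def pvConsume : List (String × Int) → PySem.Dict String Int → Option (PySem.Dict String Int)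
  | [], result => some result
  | (c, n) :: rest, result =>
    match result.get? c with
    | none => none
    | some hv =>
      if hv < n then none
      else if hv = n then pvConsume rest (result.erase c)
      else pvConsume rest (result.insert c (hv - n))

-- the tally loop `need[c] = need.get(c, 0) + 1`, then the batch-subtraction pass
def isWordInString_alt (word : String) (iunorderedString : List (String × Int)) : Option (List (String × Int)) :=
  (pvConsume
      ((pvChars word).foldl
        (fun d s => d.insert s (d.getD s 0 + 1)) PySem.Dict.empty).items
      (PySem.Dict.mk iunorderedString)).map PySem.Dict.items

-- ===== PRECONDITION & SPEC =====
-- Pre_ only requires the association list to have pairwise-distinct keys — i.e. to actually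
-- represent a Python dict (A's parameter IS a dict, which can never hold a duplicate key);
-- no Python-representable input is excluded.
def Pre_isWordInString (word : String) (iunorderedString : List (String × Int)) : Prop :=
  (iunorderedString.map Prod.fst).Nodup
instance (word : String) (iunorderedString : List (String × Int)) : Decidable (Pre_isWordInString word iunorderedString) := by unfold Pre_isWordInString; infer_instance

def pvWitness_isWordInString : String × (List (String × Int)) := ("aab", [("a", 3), ("b", 1), ("c", 0)])

-- On inputs where every character of the word is in the dict with count either ≥ its needed
-- multiplicity or ≤ 0, and some needed character's count is ≤ 0, A returns the dict with that
-- count driven further negative (its delete-only-on-exactly-zero streaming never fails there),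
-- while B returns none because the multiset cannot supply the word — the intended value.
def D_isWordInString (word : String) (iunorderedString : List (String × Int)) : Prop :=
  let d := PySem.Dict.mk iunorderedString
  (∀ s ∈ pvChars word, ∃ v ∈ d.get? s, v ≤ 0 ∨ ((pvChars word).count s : Int) ≤ v)
    ∧ ∃ s ∈ pvChars word, d.getD s 1 ≤ 0
instance (word : String) (iunorderedString : List (String × Int)) : Decidable (D_isWordInString word iunorderedString) := by unfold D_isWordInString; infer_instance

def Spec_isWordInString (word : String) (iunorderedString : List (String × Int)) (out : Option (List (String × Int))) : Prop := ¬ D_isWordInString word iunorderedString → out = isWordInString_alt word iunorderedString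
instance (word : String) (iunorderedString : List (String × Int)) (out : Option (List (String × Int))) : Decidable (Spec_isWordInString word iunorderedString out) := by unfold Spec_isWordInString; infer_instance

def pvDiffWitness_isWordInString : String × (List (String × Int)) := ("a", [("a", 0)])
def pvDiffWitnessOut_isWordInString : (Option (List (String × Int))) × (Option (List (String × Int))) := (some [("a", -1)], none)

-- ===== CLAIM (what is proved, stated in full; the proofs are below) =====
def Claim_unchanged_isWordInString : Prop := ∀ (word : String) (iunorderedString : List (String × Int)), Dom_isWordInString word iunorderedString → Pre_isWordInString word iunorderedString → Spec_isWordInString word iunorderedString (isWordInString word iunorderedString)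
def Claim_changed_isWordInString : Prop := Dom_isWordInString (pvDiffWitness_isWordInString.1) (pvDiffWitness_isWordInString.2) ∧ Pre_isWordInString (pvDiffWitness_isWordInString.1) (pvDiffWitness_isWordInString.2) ∧ D_isWordInString (pvDiffWitness_isWordInString.1) (pvDiffWitness_isWordInString.2) ∧ isWordInString (pvDiffWitness_isWordInString.1) (pvDiffWitness_isWordInString.2) = pvDiffWitnessOut_isWordInString.1 ∧ isWordInString_alt (pvDiffWitness_isWordInString.1) (pvDiffWitness_isWordInString.2) = pvDiffWitnessOut_isWordInString.2 ∧ pvDiffWitnessOut_isWordInString.1 ≠ pvDiffWitnessOut_isWordInString.2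
def Claim_exact_isWordInString : Prop := ∀ (word : String) (iunorderedString : List (String × Int)), Dom_isWordInString word iunorderedString → Pre_isWordInString word iunorderedString → D_isWordInString word iunorderedString → isWordInString word iunorderedString ≠ isWordInString_alt word iunorderedString

-- ===== LEMMAS AND PROOFS =====

-- number of occurrences of the key t in the word's key list L
def pvNeed (L : List String) (t : String) : Int := (L.count t : Int)

-- A's per-key success test (v ≤ 0 or enough supply), with an explicit need n …
def pvCheckAP (d : PySem.Dict String Int) (s : String) (n : Int) : Bool :=
  match d.get? s with
  | none => false
  | some v => !(decide (1 ≤ v) && decide (v < n))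

-- … and with the need read off the whole word L
def pvCheckA (d : PySem.Dict String Int) (L : List String) (s : String) : Bool :=
  pvCheckAP d s (pvNeed L s)

-- B's per-key success test: present with at least n
def pvCheckB (d : PySem.Dict String Int) (s : String) (n : Int) : Bool :=
  match d.get? s with
  | none => false
  | some v => decide (n ≤ v)

-- entrywise final dict: subtract the need; drop a key consumed to exactly zero
def pvF (L : List String) (q : String × Int) : Option (String × Int) :=
  if q.2 = pvNeed L q.1 ∧ pvNeed L q.1 ≠ 0 then none else some (q.1, q.2 - pvNeed L q.1)

def pvFP (ps : List (String × Int)) (q : String × Int) : Option (String × Int) :=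
  match (PySem.Dict.mk ps).get? q.1 with
  | none => some q
  | some n => if q.2 = n then none else some (q.1, q.2 - n)

def pvSpecA (L : List String) (d : PySem.Dict String Int) : Option (PySem.Dict String Int) :=
  if L.all (pvCheckA d L) then some (PySem.Dict.mk (d.items.filterMap (pvF L))) else none

def pvSpecBP (ps : List (String × Int)) (d : PySem.Dict String Int) : Option (PySem.Dict String Int) :=
  if ps.all (fun p => pvCheckB d p.1 p.2) then some (PySem.Dict.mk (d.items.filterMap (pvFP ps))) else none

def pvSpecB (L : List String) (d : PySem.Dict String Int) : Option (PySem.Dict String Int) :=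
  if L.all (fun s => pvCheckB d s (pvNeed L s)) then some (PySem.Dict.mk (d.items.filterMap (pvF L))) else none

theorem pvFoldlA_none (L : List String) : L.foldl pvStepA none = none := by
  induction L with
  | nil => rfl
  | cons c L ih => simpa [pvStepA] using ih

theorem pvGet?_erase (d : PySem.Dict String Int) (k t : String) :
    (d.erase k).get? t = if t = k then none else d.get? t := by
  obtain ⟨l⟩ := d
  induction l with
  | nil => simp [PySem.Dict.erase, PySem.Dict.get?]
  | cons p l ih =>
    by_cases hpk : p.1 = k <;> by_cases hpt : p.1 = t <;>
      simp_all [PySem.Dict.erase, PySem.Dict.get?, List.filter_cons]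

theorem pvNodupKeys_erase (d : PySem.Dict String Int) (k : String) (h : d.keys.Nodup) :
    (d.erase k).keys.Nodup := by
  obtain ⟨l⟩ := d
  simp only [PySem.Dict.erase, PySem.Dict.keys] at *
  exact List.Nodup.sublist (List.filter_sublist.map _) h

theorem pvFilterMap_insert (d : PySem.Dict String Int) (c : String) (w : Int)
    (hc : d.contains c = true) (g : String × Int → Option (String × Int)) :
    ((d.insert c w).items).filterMap g
      = d.items.filterMap (fun p => if p.1 = c then g (c, w) else g p) := by
  rw [PySem.Dict.items_insert_of_contains d w hc, List.filterMap_map]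
  refine List.filterMap_congr fun p _ => ?_
  by_cases h : p.1 = c <;> simp [Function.comp, h]

theorem pvFilterMap_erase (d : PySem.Dict String Int) (k : String)
    (g : String × Int → Option (String × Int)) :
    ((d.erase k).items).filterMap g
      = d.items.filterMap (fun p => if p.1 = k then none else g p) := by
  obtain ⟨l⟩ := d
  show (l.filter _).filterMap g = _
  induction l with
  | nil => rfl
  | cons p l ih =>
    by_cases h : p.1 = k <;>
      simp_all [List.filter_cons, List.filterMap_cons]

theorem pvListEraseInsertAux (l : List (String × Int)) (k : String) (w : Int) :
    ((l.map (fun p => if p.1 == k then (k, w) else p)).filter (fun p => !(p.1 == k)))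
      = l.filter (fun p => !(p.1 == k)) := by
  induction l with
  | nil => rfl
  | cons p l ih =>
    by_cases h : p.1 = k <;> simp_all [List.filter_cons]

theorem pvErase_insert (d : PySem.Dict String Int) (k : String) (w : Int) :
    (d.insert k w).erase k = d.erase k := by
  apply PySem.Dict.ext
  by_cases hc : d.contains k = true
  · show ((d.insert k w).items).filter _ = (d.items).filter _
    rw [PySem.Dict.items_insert_of_contains d w hc]
    exact pvListEraseInsertAux d.items k w
  · show ((d.insert k w).items).filter _ = (d.items).filter _
    have h2 : (d.insert k w).items = d.items ++ [(k, w)] := by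
      simp [PySem.Dict.insert, hc]
    rw [h2, List.filter_append]
    simp

-- A's streaming loop equals A's word-level specification
theorem pvLemA (L : List String) : ∀ (d : PySem.Dict String Int), d.keys.Nodup →
    L.foldl pvStepA (some d) = pvSpecA L d := by
  induction L with
  | nil =>
    intro d hd
    simp [pvSpecA, pvF, pvNeed]
  | cons c L ih =>
    intro d hd
    rw [List.foldl_cons]
    cases hg : d.get? c with
    | none =>
      have hstep : pvStepA (some d) c = none := by simp [pvStepA, hg]
      rw [hstep, pvFoldlA_none]
      have hcheck : pvCheckA d (c :: L) c = false := by
        simp [pvCheckA, pvCheckAP, hg]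
      simp [pvSpecA, List.all_cons, hcheck]
    | some v =>
      have hcont : d.contains c = true := by
        rw [PySem.Dict.contains_eq_isSome_get?, hg]; rfl
      by_cases hv : v - 1 = 0
      · -- consumed to zero: A deletes the key
        have hstep : pvStepA (some d) c = some (d.erase c) := by
          simp [pvStepA, hg, hv, pvErase_insert]
        rw [hstep, ih _ (pvNodupKeys_erase d c hd)]
        by_cases hcL : c ∈ L
        · -- the key is needed again later: both sides fail
          have hpos : 0 < L.count c := List.count_pos_iff.mpr hcL
          have h1 : L.all (pvCheckA (d.erase c) L) = false :=
            List.all_eq_false.mpr ⟨c, hcL, by simp [pvCheckA, pvCheckAP, pvGet?_erase]⟩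
          have h2 : (c :: L).all (pvCheckA d (c :: L)) = false := by
            refine List.all_eq_false.mpr ⟨c, List.mem_cons_self, ?_⟩
            simp [pvCheckA, pvCheckAP, pvNeed, hg, List.count_cons_self]
            push_cast
            omega
          simp [pvSpecA, h1, h2]
        · -- last occurrence: checks and residuals agree pointwise
          have hcnt0 : L.count c = 0 := List.count_eq_zero.mpr hcL
          have hall : L.all (pvCheckA (d.erase c) L) = (c :: L).all (pvCheckA d (c :: L)) := by
            rw [List.all_cons]
            have hhead : pvCheckA d (c :: L) c = true := by
              simp [pvCheckA, pvCheckAP, pvNeed, hg, List.count_cons_self, hcnt0]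
              omega
            rw [hhead, Bool.true_and, Bool.eq_iff_iff, List.all_eq_true, List.all_eq_true]
            refine forall_congr' fun t => forall_congr' fun ht => ?_
            have htc : t ≠ c := fun h => hcL (h ▸ ht)
            have heq : pvCheckA (d.erase c) L t = pvCheckA d (c :: L) t := by
              simp [pvCheckA, pvCheckAP, pvNeed, pvGet?_erase, htc, List.count_cons,
                Ne.symm htc]
              rfl
            rw [heq]
          have hres : (d.erase c).items.filterMap (pvF L)
              = d.items.filterMap (pvF (c :: L)) := by
            rw [pvFilterMap_erase]
            refine List.filterMap_congr fun p hp => ?_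
            obtain ⟨ps, pw⟩ := p
            have hget := PySem.Dict.get?_of_mem_items (d := d) (k := ps) (v := pw) hp hd
            by_cases hpc : ps = c
            · rw [hpc] at hget
              rw [hg] at hget
              have hw : pw = v := (Option.some.inj hget).symm
              have hv1 : pw = 1 := by omega
              show (if ps = c then none else pvF L (ps, pw)) = pvF (c :: L) (ps, pw)
              rw [if_pos hpc, hpc, hv1]
              simp [pvF, pvNeed, List.count_cons_self, hcnt0]
            · simp only [hpc, if_false]
              simp [pvF, pvNeed, List.count_cons, Ne.symm hpc]
          simp only [pvSpecA]
          rw [hall, hres]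
      · -- not consumed to zero: A overwrites with v - 1
        have hstep : pvStepA (some d) c = some (d.insert c (v - 1)) := by
          simp [pvStepA, hg, hv]
        rw [hstep, ih _ (PySem.Dict.nodup_keys_insert d c (v - 1) hd)]
        have hall : L.all (pvCheckA (d.insert c (v - 1)) L)
            = (c :: L).all (pvCheckA d (c :: L)) := by
          rw [Bool.eq_iff_iff, List.all_eq_true, List.all_eq_true]
          have hcongr : ∀ t ∈ L, t ≠ c →
              pvCheckA (d.insert c (v - 1)) L t = pvCheckA d (c :: L) t := by
            intro t ht htc
            simp [pvCheckA, pvCheckAP, pvNeed, PySem.Dict.get?_insert, htc, List.count_cons,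
              Ne.symm htc]
            rfl
          have hheadIff : pvCheckA d (c :: L) c = true ↔
              ¬(1 ≤ v ∧ v < (L.count c : Int) + 1) := by
            simp [pvCheckA, pvCheckAP, pvNeed, hg, List.count_cons_self]
            push_cast
            try omega
          have hselfIff : pvCheckA (d.insert c (v - 1)) L c = true ↔
              ¬(1 ≤ v - 1 ∧ v - 1 < (L.count c : Int)) := by
            simp [pvCheckA, pvCheckAP, pvNeed, PySem.Dict.get?_insert]
            try omega
          constructor
          · intro h t ht
            rcases List.mem_cons.mp ht with rfl | htL
            · by_cases hcL : t ∈ L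
              · have := hselfIff.mp (h t hcL)
                rw [hheadIff]; omega
              · have hcnt0 : L.count t = 0 := List.count_eq_zero.mpr hcL
                rw [hheadIff, hcnt0]; push_cast; omega
            · by_cases htc : t = c
              · subst htc
                have := hselfIff.mp (h t htL)
                rw [hheadIff]; omega
              · rw [← hcongr t htL htc]; exact h t htL
          · intro h t ht
            by_cases htc : t = c
            · subst htc
              have := hheadIff.mp (h t List.mem_cons_self)
              rw [hselfIff]; omega
            · rw [hcongr t ht htc]; exact h t (List.mem_cons_of_mem c ht)
        have hres : (d.insert c (v - 1)).items.filterMap (pvF L)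
            = d.items.filterMap (pvF (c :: L)) := by
          rw [pvFilterMap_insert d c (v - 1) hcont]
          refine List.filterMap_congr fun p hp => ?_
          obtain ⟨ps, pw⟩ := p
          have hget := PySem.Dict.get?_of_mem_items (d := d) (k := ps) (v := pw) hp hd
          by_cases hpc : ps = c
          · rw [hpc] at hget
            rw [hg] at hget
            have hw : pw = v := (Option.some.inj hget).symm
            show (if ps = c then pvF L (c, v - 1) else pvF L (ps, pw)) = pvF (c :: L) (ps, pw)
            rw [if_pos hpc, hpc, hw]
            simp only [pvF, pvNeed, List.count_cons_self]
            push_cast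
            split_ifs with h1 h2 h2
            · rfl
            · exfalso; omega
            · exfalso; omega
            · have hval : v - 1 - (L.count c : Int) = v - ((L.count c : Int) + 1) := by ring
              rw [hval]
          · simp only [hpc, if_false]
            simp [pvF, pvNeed, List.count_cons, Ne.symm hpc]
        simp only [pvSpecA]
        rw [hall, hres]

-- B's distinct-key recursion equals the pair-level specification
theorem pvLemB (ps : List (String × Int)) : ∀ (d : PySem.Dict String Int),
    (∀ p ∈ ps, 1 ≤ p.2) → (ps.map Prod.fst).Nodup → d.keys.Nodup →
    pvConsume ps d = pvSpecBP ps d := by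
  induction ps with
  | nil =>
    intro d _ _ _
    show some d = pvSpecBP [] d
    unfold pvSpecBP
    simp only [List.all_nil, if_true]
    rw [show pvFP ([] : List (String × Int)) = some from rfl, List.filterMap_some]
  | cons p rest ih =>
    intro d hpos hnd hd
    obtain ⟨s, n⟩ := p
    have hn : 1 ≤ n := hpos _ List.mem_cons_self
    rw [List.map_cons, List.nodup_cons] at hnd
    obtain ⟨hsrest, hndrest⟩ := hnd
    have hposrest : ∀ p ∈ rest, 1 ≤ p.2 := fun p hp => hpos p (List.mem_cons_of_mem _ hp)
    cases hg : d.get? s with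
    | none =>
      have hcheck : pvCheckB d s n = false := by simp [pvCheckB, hg]
      rw [show pvConsume ((s, n) :: rest) d = none by simp [pvConsume, hg]]
      simp [pvSpecBP, List.all_cons, hcheck]
    | some v =>
      have hcont : d.contains s = true := by
        rw [PySem.Dict.contains_eq_isSome_get?, hg]; rfl
      by_cases hfail : v < n
      · have hcheck : pvCheckB d s n = false := by
          simp [pvCheckB, hg]
          omega
        rw [show pvConsume ((s, n) :: rest) d = none by simp [pvConsume, hg, hfail]]
        simp [pvSpecBP, List.all_cons, hcheck]
      · have hrestcheck : ∀ (d' : PySem.Dict String Int),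
            (∀ t, t ≠ s → d'.get? t = d.get? t) →
            rest.all (fun p => pvCheckB d' p.1 p.2) = rest.all (fun p => pvCheckB d p.1 p.2) := by
          intro d' hsame
          rw [Bool.eq_iff_iff, List.all_eq_true, List.all_eq_true]
          refine forall_congr' fun q => forall_congr' fun hq => ?_
          have hqs : q.1 ≠ s := fun h => hsrest (h ▸ (List.mem_map.mpr ⟨q, hq, rfl⟩ : q.1 ∈ rest.map Prod.fst))
          rw [show pvCheckB d' q.1 q.2 = pvCheckB d q.1 q.2 by
            simp only [pvCheckB, hsame q.1 hqs]]
        have hhead : pvCheckB d s n = true := by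
          simp [pvCheckB, hg]
          omega
        by_cases heq : v = n
        · rw [show pvConsume ((s, n) :: rest) d = pvConsume rest (d.erase s) by
            simp [pvConsume, hg, hfail, heq]]
          rw [ih _ hposrest hndrest (pvNodupKeys_erase d s hd)]
          have hall : rest.all (fun p => pvCheckB (d.erase s) p.1 p.2)
              = ((s, n) :: rest).all (fun p => pvCheckB d p.1 p.2) := by
            simp only [List.all_cons]
            rw [hhead, Bool.true_and]
            exact hrestcheck _ (fun t hts => by rw [pvGet?_erase, if_neg hts])
          have hres : (d.erase s).items.filterMap (pvFP rest)
              = d.items.filterMap (pvFP ((s, n) :: rest)) := by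
            rw [pvFilterMap_erase]
            refine List.filterMap_congr fun q hq => ?_
            obtain ⟨qs, qw⟩ := q
            have hget := PySem.Dict.get?_of_mem_items (d := d) (k := qs) (v := qw) hq hd
            by_cases hqs : qs = s
            · rw [hqs] at hget
              rw [hg] at hget
              have hw : qw = v := (Option.some.inj hget).symm
              show (if qs = s then none else pvFP rest (qs, qw)) = pvFP ((s, n) :: rest) (qs, qw)
              rw [if_pos hqs, hqs, hw]
              simp [pvFP, PySem.Dict.get?_mk_cons, heq]
            · have hbeq : (s == qs) = false := beq_eq_false_iff_ne.mpr (Ne.symm hqs)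
              simp only [hqs, if_false, pvFP, PySem.Dict.get?_mk_cons, hbeq]
              simp
          simp only [pvSpecBP]
          rw [hall, hres]
        · rw [show pvConsume ((s, n) :: rest) d = pvConsume rest (d.insert s (v - n)) by
            simp [pvConsume, hg, hfail, heq]]
          rw [ih _ hposrest hndrest (PySem.Dict.nodup_keys_insert d s (v - n) hd)]
          have hall : rest.all (fun p => pvCheckB (d.insert s (v - n)) p.1 p.2)
              = ((s, n) :: rest).all (fun p => pvCheckB d p.1 p.2) := by
            simp only [List.all_cons]
            rw [hhead, Bool.true_and]
            exact hrestcheck _ (fun t hts => by rw [PySem.Dict.get?_insert, if_neg hts])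
          have hres : (d.insert s (v - n)).items.filterMap (pvFP rest)
              = d.items.filterMap (pvFP ((s, n) :: rest)) := by
            rw [pvFilterMap_insert d s (v - n) hcont]
            refine List.filterMap_congr fun q hq => ?_
            obtain ⟨qs, qw⟩ := q
            have hget := PySem.Dict.get?_of_mem_items (d := d) (k := qs) (v := qw) hq hd
            by_cases hqs : qs = s
            · rw [hqs] at hget
              rw [hg] at hget
              have hw : qw = v := (Option.some.inj hget).symm
              have hmkrest : (PySem.Dict.mk rest).get? s = none := by
                rw [PySem.Dict.get?_eq_none_iff_not_mem_keys]
                simpa [PySem.Dict.keys_mk] using hsrest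
              show (if qs = s then pvFP rest (s, v - n) else pvFP rest (qs, qw)) = pvFP ((s, n) :: rest) (qs, qw)
              rw [if_pos hqs, hqs, hw]
              simp [pvFP, PySem.Dict.get?_mk_cons, hmkrest, heq]
            · have hbeq : (s == qs) = false := beq_eq_false_iff_ne.mpr (Ne.symm hqs)
              simp only [hqs, if_false, pvFP, PySem.Dict.get?_mk_cons, hbeq]
              simp
          simp only [pvSpecBP]
          rw [hall, hres]

theorem pvGet?_mkmap (S : List String) (g : String → Int) (t : String) :
    (PySem.Dict.mk (S.map (fun s => (s, g s)))).get? t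
      = if t ∈ S then some (g t) else none := by
  induction S with
  | nil => simp [PySem.Dict.get?]
  | cons a S ih =>
    rw [List.map_cons, PySem.Dict.get?_mk_cons]
    by_cases h : a = t
    · subst h; simp
    · have hta : ¬ t = a := fun hh => h hh.symm
      simp [h, ih, hta]

-- the pair-level spec at the word's tally is B's word-level spec
theorem pvSpecBP_pairs (L : List String) (d : PySem.Dict String Int) :
    pvSpecBP ((PySem.Set.ofList L).map (fun s => (s, (L.count s : Int)))) d = pvSpecB L d := by
  have hall : ((PySem.Set.ofList L).map (fun s => (s, (L.count s : Int)))).all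
      (fun p => pvCheckB d p.1 p.2) = L.all (fun s => pvCheckB d s (pvNeed L s)) := by
    rw [Bool.eq_iff_iff, List.all_eq_true, List.all_eq_true]
    constructor
    · intro h t ht
      exact h (t, (L.count t : Int))
        (List.mem_map.mpr ⟨t, (PySem.Set.mem_ofList L t).mpr ht, rfl⟩)
    · intro h q hq
      obtain ⟨s, hs, rfl⟩ := List.mem_map.mp hq
      exact h s ((PySem.Set.mem_ofList L s).mp hs)
  have hf : ∀ q, pvFP ((PySem.Set.ofList L).map (fun s => (s, (L.count s : Int)))) q
      = pvF L q := by
    intro q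
    rw [pvFP, pvGet?_mkmap]
    by_cases hq : q.1 ∈ PySem.Set.ofList L
    · have hqL : q.1 ∈ L := (PySem.Set.mem_ofList L q.1).mp hq
      have hpos : 0 < L.count q.1 := List.count_pos_iff.mpr hqL
      rw [if_pos hq]
      simp only [pvF, pvNeed]
      split_ifs with h1 h2 h2 <;> first
        | rfl
        | (exfalso; omega)
    · have hqL : q.1 ∉ L := fun h => hq ((PySem.Set.mem_ofList L q.1).mpr h)
      have hcnt : L.count q.1 = 0 := List.count_eq_zero.mpr hqL
      rw [if_neg hq]
      simp [pvF, pvNeed, hcnt]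
  unfold pvSpecBP pvSpecB
  rw [hall, List.filterMap_congr (fun q _ => hf q)]

-- A's port evaluates to pvSpecA, B's port to pvSpecB, on any nodup-key input
theorem pvA_eq (word : String) (iu : List (String × Int))
    (hpre : (iu.map Prod.fst).Nodup) :
    isWordInString word iu
      = (pvSpecA (pvChars word) (PySem.Dict.mk iu)).map PySem.Dict.items := by
  have hd : (PySem.Dict.mk iu).keys.Nodup := by
    rw [PySem.Dict.keys_mk]; simpa using hpre
  unfold isWordInString
  rw [pvLemA _ _ hd]

theorem pvB_eq (word : String) (iu : List (String × Int))
    (hpre : (iu.map Prod.fst).Nodup) :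
    isWordInString_alt word iu
      = (pvSpecB (pvChars word) (PySem.Dict.mk iu)).map PySem.Dict.items := by
  have hd : (PySem.Dict.mk iu).keys.Nodup := by
    rw [PySem.Dict.keys_mk]; simpa using hpre
  unfold isWordInString_alt
  rw [PySem.Dict.foldl_insert_getD_add_one_eq_counter, PySem.Dict.items_counter]
  have hpos : ∀ p ∈ (PySem.Set.ofList (pvChars word)).map
      (fun s => (s, ((pvChars word).count s : Int))), 1 ≤ p.2 := by
    intro p hp
    obtain ⟨s, hs, rfl⟩ := List.mem_map.mp hp
    show 1 ≤ ((pvChars word).count s : Int)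
    exact_mod_cast List.count_pos_iff.mpr ((PySem.Set.mem_ofList _ s).mp hs)
  have hnd : (((PySem.Set.ofList (pvChars word)).map
      (fun s => (s, ((pvChars word).count s : Int)))).map
      Prod.fst).Nodup := by
    rw [List.map_map]
    rw [show (Prod.fst ∘ fun s : String =>
        (s, ((pvChars word).count s : Int))) = id from rfl]
    rw [List.map_id]
    exact PySem.Set.nodup_ofList (pvChars word)
  rw [pvLemB _ _ hpos hnd hd, pvSpecBP_pairs]

-- D_ rephrased through A's spec-level check
theorem pvD_iff (word : String) (iu : List (String × Int)) :
    D_isWordInString word iu ↔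
      ((pvChars word).all
          (pvCheckA (PySem.Dict.mk iu) (pvChars word)) = true
        ∧ ∃ t ∈ pvChars word,
            ∃ v, (PySem.Dict.mk iu).get? t = some v ∧ v ≤ 0) := by
  unfold D_isWordInString
  refine and_congr ?_ ?_
  · rw [List.all_eq_true]
    refine forall_congr' fun t => forall_congr' fun _ => ?_
    cases hg : (PySem.Dict.mk iu).get? t with
    | none => simp [pvCheckA, pvCheckAP, hg]
    | some v =>
      simp [pvCheckA, pvCheckAP, pvNeed, hg, Option.mem_def]
      constructor
      · rintro (h | h) <;> omega
      · intro h; omega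
  · refine exists_congr fun t => and_congr_right fun _ => ?_
    cases hg : (PySem.Dict.mk iu).get? t with
    | none => simp [PySem.Dict.getD, hg]
    | some v => simp [PySem.Dict.getD, hg, Option.mem_def]

-- ===== VERDICT (by name: the statements are the Claim_ definitions above) =====
theorem isWordInString_spec : Claim_unchanged_isWordInString := by
  intro word iu _hdom hpre hnd
  rw [pvA_eq _ _ hpre, pvB_eq _ _ hpre]
  rw [pvD_iff] at hnd
  set L := pvChars word with hL
  set d := PySem.Dict.mk iu with hdd
  by_cases hA : L.all (pvCheckA d L) = true
  · -- A succeeds; since ¬D_ and conjunct 1 holds, conjunct 2 fails: no needed key is ≤ 0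
    have hc2 : ¬ ∃ t ∈ L, ∃ v, d.get? t = some v ∧ v ≤ 0 := fun h => hnd ⟨hA, h⟩
    have hB : L.all (fun s => pvCheckB d s (pvNeed L s)) = true := by
      rw [List.all_eq_true] at hA ⊢
      intro t ht
      have h1 := hA t ht
      cases hg : d.get? t with
      | none => simp [pvCheckA, pvCheckAP, hg] at h1
      | some v =>
        have hv0 : ¬ v ≤ 0 := fun hv0 => hc2 ⟨t, ht, v, hg, hv0⟩
        simp [pvCheckA, pvCheckAP, pvNeed, hg] at h1
        simp [pvCheckB, pvNeed, hg]
        omega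
    simp [pvSpecA, pvSpecB, hA, hB]
  · -- A fails; B's check is pointwise stronger, so B fails too
    have hB : ¬ (L.all (fun s => pvCheckB d s (pvNeed L s)) = true) := by
      intro hB
      apply hA
      rw [List.all_eq_true] at hB ⊢
      intro t ht
      have h1 := hB t ht
      cases hg : d.get? t with
      | none => simp [pvCheckB, hg] at h1
      | some v =>
        simp [pvCheckB, pvNeed, hg] at h1
        simp [pvCheckA, pvCheckAP, pvNeed, hg]
        omega
    simp [pvSpecA, pvSpecB, hA, hB]

theorem isWordInString_changed : Claim_changed_isWordInString := by
  unfold Claim_changed_isWordInString; decide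

theorem isWordInString_tight : Claim_exact_isWordInString := by
  intro word iu _hdom hpre hD
  obtain ⟨hA, t, htL, v, hg, hv0⟩ := (pvD_iff word iu).mp hD
  rw [pvA_eq _ _ hpre, pvB_eq _ _ hpre]
  set L := pvChars word with hL
  set d := PySem.Dict.mk iu with hdd
  have hB : L.all (fun s => pvCheckB d s (pvNeed L s)) = false := by
    refine List.all_eq_false.mpr ⟨t, htL, ?_⟩
    have hpos : 0 < L.count t := List.count_pos_iff.mpr htL
    simp [pvCheckB, pvNeed, hg]
    omega
  simp [pvSpecA, pvSpecB, hA, hB]
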